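-- pv_equiv track=rewrite | github.com/PLSE-Lab/Python-MLAPI-expl | python_sources/pooled-gru-glove.py | fit_on_sequence
-- ===== SOURCE A (Python) =====
-- def fit_on_sequence(seqs):
--     word_counts = dict()
--     for seq in seqs:
--         for w in seq:
--             if w not in word_counts:
--                 word_counts[w] = 0
--             word_counts[w] += 1
--     wcounts = list(word_counts.items())
--     wcounts.sort(key=lambda x: x[1], reverse=True)
--     sorted_voc = [wc[0] for wc in wcounts if wc[1]>=3]
--     sorted_voc = [wc[0] for wc in wcounts]
--     word_index = dict(list(zip(sorted_voc, list(range(1, len(sorted_voc) + 1)))))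
--     return word_index
-- ===== SOURCE B (Python) =====
-- def fit_on_sequence(seqs):
--     counts = {}
--     for seq in seqs:
--         for w in seq:
--             counts[w] = counts.get(w, 0) + 1
--     buckets = {}
--     for w, c in counts.items():
--         buckets.setdefault(c, []).append(w)
--     maxc = max(buckets, default=0)
--     word_index = {}
--     idx = 1
--     for c in range(maxc, 0, -1):
--         for w in buckets.get(c, []):
--             word_index[w] = idx
--             idx += 1
--     return word_index
-- ===== Notes on version B (the rewrite author's own statement) =====
-- stated objective: faster
-- what changed: Replaces the stable reverse comparison sort of (word, count) items by a bucket pass: words are grouped into per-count buckets in first-occurrence order and emitted for counts maxc down to 1, assigning 1-based indices directly.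
import Mathlib
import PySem

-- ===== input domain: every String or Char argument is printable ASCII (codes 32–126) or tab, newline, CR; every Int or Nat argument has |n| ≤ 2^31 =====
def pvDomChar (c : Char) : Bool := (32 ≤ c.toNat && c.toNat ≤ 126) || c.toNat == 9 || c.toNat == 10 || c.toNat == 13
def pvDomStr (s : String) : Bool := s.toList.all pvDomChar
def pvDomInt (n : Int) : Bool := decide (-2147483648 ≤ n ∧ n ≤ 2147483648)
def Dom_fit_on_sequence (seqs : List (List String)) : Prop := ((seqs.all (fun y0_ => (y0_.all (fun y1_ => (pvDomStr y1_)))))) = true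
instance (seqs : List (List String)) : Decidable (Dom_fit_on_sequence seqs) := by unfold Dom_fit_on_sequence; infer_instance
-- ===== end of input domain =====

-- B replaces A's stable reverse sort by count with a bucket pass: words are grouped by
-- their count and emitted for counts maxc, maxc-1, …, 1 (alternative decomposition).

-- ===== PORT A =====
def fit_on_sequence (seqs : List (List String)) : List (String × Int) :=
  let word_counts : PySem.Dict String Int :=
    seqs.foldl (fun d seq => seq.foldl (fun d w =>
      let d := if d.contains w then d else d.insert w 0   -- if w not in word_counts: word_counts[w] = 0
      d.modify w 0 (· + 1)) d) PySem.Dict.empty           -- word_counts[w] += 1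
  let wcounts := word_counts.items
  let wcounts := PySem.List.sorted wcounts (fun x => x.2) true
  let _sorted_voc := (wcounts.filter (fun wc => decide (wc.2 ≥ 3))).map (fun wc => wc.1)  -- dead: rebound next line
  let sorted_voc := wcounts.map (fun wc => wc.1)
  let word_index := PySem.Dict.ofList (sorted_voc.zip
    (PySem.List.pyRange 1 (PySem.List.len sorted_voc + 1) 1))
  word_index.items

-- ===== PORT B =====
def fitAltCounts (seqs : List (List String)) : PySem.Dict String Int :=
  seqs.foldl (fun d seq => seq.foldl (fun d w => d.insert w (d.getD w 0 + 1)) d) PySem.Dict.empty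

-- buckets.setdefault(c, []).append(w)  ==  buckets[c] = buckets.get(c, []) + [w]  (ported as one modify)
def fitAltBuckets (counts : PySem.Dict String Int) : PySem.Dict Int (List String) :=
  counts.items.foldl (fun b p => b.modify p.2 [] (fun l => l ++ [p.1])) PySem.Dict.empty

-- 'for c in range(maxc, 0, -1): for w in buckets.get(c, []): word_index[w] = idx; idx += 1'
-- as the structural countdown recursion on c (c = maxc.toNat, 0 stops the loop)
def fitAltAssign (buckets : PySem.Dict Int (List String)) :
    Nat → PySem.Dict String Int × Int → PySem.Dict String Int × Int
  | 0, acc => acc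
  | c + 1, acc =>
      fitAltAssign buckets c
        ((buckets.getD ((c : Int) + 1) []).foldl (fun s w => (s.1.insert w s.2, s.2 + 1)) acc)

def fit_on_sequence_alt (seqs : List (List String)) : List (String × Int) :=
  let counts := fitAltCounts seqs
  let buckets := fitAltBuckets counts
  let maxc := PySem.List.maxD buckets.keys (fun x => x) 0
  (fitAltAssign buckets maxc.toNat (PySem.Dict.empty, 1)).1.items

-- ===== PRECONDITION & SPEC =====
def Spec_fit_on_sequence (seqs : List (List String)) (out : List (String × Int)) : Prop := out = fit_on_sequence_alt seqs
instance (seqs : List (List String)) (out : List (String × Int)) : Decidable (Spec_fit_on_sequence seqs out) := by unfold Spec_fit_on_sequence; infer_instance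

-- ===== CLAIM (what is proved, stated in full; the proofs are below) =====
def Claim_equal_fit_on_sequence : Prop := ∀ (seqs : List (List String)), Dom_fit_on_sequence seqs → Spec_fit_on_sequence seqs (fit_on_sequence seqs)

-- ===== LEMMAS AND PROOFS =====

-- descending list of counts [c, c-1, …, 1] as Ints
def fitDesc : Nat → List Int
  | 0 => []
  | c + 1 => ((c : Int) + 1) :: fitDesc c

theorem mem_fitDesc {m : Int} {c : Nat} : m ∈ fitDesc c ↔ 1 ≤ m ∧ m ≤ (c : Int) := by
  induction c with
  | zero => simp [fitDesc]; omega
  | succ c ih => simp [fitDesc, ih]; omega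

theorem fitDesc_split {k c : Nat} (h : k + 1 ≤ c) :
    ∃ u, fitDesc c = u ++ fitDesc (k + 1) ∧ ∀ m ∈ u, ((k : Int) + 1) < m := by
  induction c with
  | zero => omega
  | succ c ih =>
    rcases Nat.lt_or_ge (k + 1) (c + 1) with hlt | hge
    · obtain ⟨u, hu, hmem⟩ := ih (by omega)
      exact ⟨((c : Int) + 1) :: u, by simp [fitDesc, hu], by
        intro m hm
        rcases List.mem_cons.mp hm with hm | hm
        · rw [hm]; omega
        · exact hmem m hm⟩
    · have : k = c := by omega
      subst this
      exact ⟨[], by simp, by simp⟩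

theorem insertBy_append {α : Type} (before : α → α → Bool) (x : α) (A B : List α)
    (h : ∀ a ∈ A, before x a = false) :
    PySem.List.insertBy before x (A ++ B) = A ++ PySem.List.insertBy before x B := by
  induction A with
  | nil => simp
  | cons a A ih =>
    simp only [List.cons_append, PySem.List.insertBy, h a (by simp)]
    simp [ih (fun a ha => h a (by simp [ha]))]

theorem insertBy_head_true {α : Type} (before : α → α → Bool) (x : α) (B : List α)
    (h : ∀ b ∈ B, before x b = true) :
    PySem.List.insertBy before x B = x :: B := by
  cases B with
  | nil => simp [PySem.List.insertBy]
  | cons b B => simp [PySem.List.insertBy, h b (by simp)]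

-- the stable reverse sort by count is the concatenation of the count buckets, counts descending
theorem sorted_rev_eq_buckets (l : List (String × Int)) (c : Nat)
    (h : ∀ p ∈ l, 1 ≤ p.2 ∧ p.2 ≤ (c : Int)) :
    PySem.List.sorted l (fun x => x.2) true =
      (fitDesc c).flatMap (fun k => l.filter (fun p => p.2 == k)) := by
  rw [PySem.List.sorted_rev_eq_foldl_insertBy]
  induction l using List.reverseRecOn with
  | nil => simp
  | append_singleton l x ih =>
    have hx := h x (by simp)
    have hl : ∀ p ∈ l, 1 ≤ p.2 ∧ p.2 ≤ (c : Int) := fun p hp => h p (by simp [hp])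
    rw [List.foldl_append, List.foldl_cons, List.foldl_nil, ih hl]
    -- split the descending count list at x's count
    obtain ⟨k, hk1, hk2, hkx⟩ : ∃ k : Nat, 1 ≤ k + 1 ∧ k + 1 ≤ c ∧ x.2 = (k : Int) + 1 := by
      refine ⟨(x.2 - 1).toNat, by omega, by omega, by omega⟩
    obtain ⟨u, hu, humem⟩ := fitDesc_split hk2
    rw [hu]
    have hfilter_eq : ∀ m ∈ u, (l ++ [x]).filter (fun p => p.2 == m) = l.filter (fun p => p.2 == m) := by
      intro m hm
      have := humem m hm
      simp [List.filter_append]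
      intro h'; omega
    have hfilter_lo : ∀ m ∈ fitDesc k, (l ++ [x]).filter (fun p => p.2 == m) = l.filter (fun p => p.2 == m) := by
      intro m hm
      rw [mem_fitDesc] at hm
      simp [List.filter_append]
      intro h'; omega
    simp only [fitDesc, List.flatMap_append, List.flatMap_cons]
    rw [List.flatMap_congr (h := hfilter_eq), List.flatMap_congr (h := hfilter_lo)]
    have hmid : (l ++ [x]).filter (fun p => p.2 == ((k : Int) + 1)) =
        l.filter (fun p => p.2 == ((k : Int) + 1)) ++ [x] := by
      simp [List.filter_append, hkx]
    rw [hmid]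
    rw [insertBy_append _ x _ _ (by
      intro a ha
      rw [List.mem_flatMap] at ha
      obtain ⟨m, hm, ha⟩ := ha
      have hgt := humem m hm
      have := (List.mem_filter.mp ha).2
      rw [beq_iff_eq] at this
      rw [decide_eq_false_iff_not]
      omega)]
    rw [insertBy_append _ x _ _ (by
      intro a ha
      have := (List.mem_filter.mp ha).2
      rw [beq_iff_eq] at this
      rw [decide_eq_false_iff_not]
      omega)]
    rw [insertBy_head_true _ x _ (by
      intro b hb
      rw [List.mem_flatMap] at hb
      obtain ⟨m, hm, hb⟩ := hb
      rw [mem_fitDesc] at hm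
      have := (List.mem_filter.mp hb).2
      rw [beq_iff_eq] at this
      rw [decide_eq_true_eq]
      omega)]
    simp

-- zipping words with range(1, n+1) is enumerate with the pair swapped
theorem zip_pyRange_eq_enumerate {α : Type} (xs : List α) (s : Int) :
    xs.zip (PySem.List.pyRange s (s + xs.length) 1) =
      (PySem.List.enumerate xs s).map (fun p => (p.2, p.1)) := by
  induction xs generalizing s with
  | nil => simp [PySem.List.pyRange_one_eq_nil]
  | cons x xs ih =>
    rw [PySem.List.pyRange_one_cons (by simp only [List.length_cons]; push_cast; omega), PySem.List.enumerate_cons]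
    simp only [List.zip_cons_cons, List.map_cons]
    rw [show s + ((x :: xs).length : Int) = (s + 1) + xs.length by simp only [List.length_cons]; push_cast; omega, ih]

-- the index-assignment fold over fresh distinct words builds exactly the zip with 1,2,…
theorem assign_fold (ws : List String) (d : PySem.Dict String Int) (i : Int)
    (hfresh : ∀ w ∈ ws, d.contains w = false) (hnd : ws.Nodup) :
    ws.foldl (fun s w => (s.1.insert w s.2, s.2 + 1)) (d, i) =
      (PySem.Dict.mk (d.items ++ (PySem.List.enumerate ws i).map (fun p => (p.2, p.1))),
        i + ws.length) := by
  induction ws generalizing d i with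
  | nil => simp [PySem.List.enumerate]
  | cons w ws ih =>
    simp only [List.foldl_cons]
    rw [ih (d.insert w i)]
    · have hwi : (d.insert w i).items = d.items ++ [(w, i)] :=
        PySem.Dict.items_insert_of_not_contains d i (hfresh w (by simp))
      rw [PySem.List.enumerate_cons]
      simp [hwi]
      omega
    · intro w' hw'
      rw [PySem.Dict.contains_insert]
      have : w' ≠ w := by rintro rfl; exact (List.nodup_cons.mp hnd).1 hw'
      simp [this, hfresh w' (by simp [hw'])]
    · exact (List.nodup_cons.mp hnd).2

-- B's countdown loop is the fold over the concatenated buckets, counts descending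
theorem fitAltAssign_eq (buckets : PySem.Dict Int (List String)) (c : Nat)
    (acc : PySem.Dict String Int × Int) :
    fitAltAssign buckets c acc =
      ((fitDesc c).flatMap (fun k => buckets.getD k [])).foldl
        (fun s w => (s.1.insert w s.2, s.2 + 1)) acc := by
  induction c generalizing acc with
  | zero => simp [fitAltAssign, fitDesc]
  | succ c ih => simp [fitAltAssign, fitDesc, ih, List.foldl_append]

-- both counting loops build Counter(flatten(seqs))
theorem counts_eq_counter (seqs : List (List String)) :
    (seqs.foldl (fun d seq => seq.foldl (fun d w =>
        (if d.contains w then d else d.insert w 0).modify w 0 (· + 1)) d) PySem.Dict.empty) =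
      PySem.Dict.counter seqs.flatten := by
  have hstep : (fun (d : PySem.Dict String Int) (w : String) =>
      (if d.contains w then d else d.insert w 0).modify w 0 (· + 1)) =
      fun d w => d.modify w 0 (· + 1) := by
    funext d w
    by_cases h : d.contains w
    · simp [h]
    · simp only [h, Bool.false_eq_true, if_false]
      simp only [PySem.Dict.modify, PySem.Dict.getD_insert_self,
        PySem.Dict.insert_insert_self,
        PySem.Dict.getD_of_not_contains d _ (by simpa using h)]
  rw [PySem.Dict.counter_eq_foldl, List.foldl_flatten, hstep]

theorem altCounts_eq_counter (seqs : List (List String)) :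
    fitAltCounts seqs = PySem.Dict.counter seqs.flatten := by
  rw [← PySem.Dict.foldl_insert_getD_add_one_eq_counter, fitAltCounts, List.foldl_flatten]

-- bucket lookup = the words of the count-c items, in order
theorem buckets_getD (counts : PySem.Dict String Int) (c : Int) :
    (fitAltBuckets counts).getD c [] =
      (counts.items.filter (fun p => p.2 == c)).map (fun p => p.1) := by
  rw [fitAltBuckets,
    ← List.foldl_map (f := fun p : String × Int => (p.2, p.1))
      (g := fun (b : PySem.Dict Int (List String)) q => b.modify q.1 [] (fun l => l ++ [q.2])),
    PySem.Dict.getD_foldl_modify_append]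
  simp [List.filter_map, List.map_map, Function.comp_def]

-- facts about the counter items: distinct words, every count ≥ 1
theorem items_fst_nodup (ws : List String) :
    ((PySem.Dict.counter ws).items.map Prod.fst).Nodup := by
  simp [PySem.Dict.items_counter, List.map_map, Function.comp_def]

theorem items_snd_pos (ws : List String) :
    ∀ p ∈ (PySem.Dict.counter ws).items, 1 ≤ p.2 := by
  intro p hp
  rw [PySem.Dict.items_counter, List.mem_map] at hp
  obtain ⟨k, hk, rfl⟩ := hp
  have : k ∈ ws := (PySem.Set.mem_ofList _ _).mp hk
  have := List.count_pos_iff.mpr this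
  simp
  omega

theorem buckets_keys (counts : PySem.Dict String Int) :
    (fitAltBuckets counts).keys = PySem.Set.ofList (counts.items.map Prod.snd) := by
  rw [fitAltBuckets]
  rw [show (fun (b : PySem.Dict Int (List String)) (p : String × Int) =>
      b.modify p.2 [] (fun l => l ++ [p.1])) =
    (fun b p => b.insert p.2 (b.getD p.2 [] ++ [p.1])) from rfl]
  rw [PySem.Dict.keys_foldl_insert_key counts.items (fun p => p.2)
    (fun b p => b.getD p.2 [] ++ [p.1]) PySem.Dict.empty]
  rw [PySem.Dict.keys_empty]
  exact PySem.Set.update_empty _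

theorem fit_on_sequence_spec : Claim_equal_fit_on_sequence := by
  intro seqs _
  show fit_on_sequence seqs = fit_on_sequence_alt seqs
  simp only [fit_on_sequence, fit_on_sequence_alt, PySem.List.len_eq]
  rw [counts_eq_counter, altCounts_eq_counter]
  set I := (PySem.Dict.counter seqs.flatten).items with hIdef
  set buckets := fitAltBuckets (PySem.Dict.counter seqs.flatten) with hBdef
  set M := PySem.List.maxD buckets.keys (fun x => x) 0 with hMdef
  set N := M.toNat with hNdef
  -- every count lies in [1, N]
  have hpos : ∀ p ∈ I, 1 ≤ p.2 := items_snd_pos seqs.flatten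
  have hkeys : buckets.keys = PySem.Set.ofList (I.map Prod.snd) := buckets_keys _
  have hbound : ∀ p ∈ I, 1 ≤ p.2 ∧ p.2 ≤ (N : Int) := by
    intro p hp
    have hmem : p.2 ∈ buckets.keys := by
      rw [hkeys, PySem.Set.mem_ofList]
      exact List.mem_map_of_mem hp
    rcases hmax : PySem.List.max? buckets.keys (fun x => x) with _ | m
    · rw [PySem.List.max?_eq_none_iff] at hmax
      rw [hmax] at hmem
      simp at hmem
    · have hle : p.2 ≤ m := PySem.List.max?_isMax hmax p.2 hmem
      have hM : M = m := by rw [hMdef, PySem.List.maxD, hmax]; rfl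
      have h1 := hpos p hp
      refine ⟨h1, ?_⟩
      rw [hNdef, hM]
      omega
  -- the common word list
  have hbuck : ∀ k, buckets.getD k [] = (I.filter (fun p => p.2 == k)).map Prod.fst :=
    fun k => buckets_getD _ k
  have hsort : (PySem.List.sorted I (fun x => x.2) true).map (fun wc => wc.1) =
      (fitDesc N).flatMap (fun k => buckets.getD k []) := by
    rw [sorted_rev_eq_buckets I N hbound, List.map_flatMap]
    exact List.flatMap_congr (fun k _ => (hbuck k).symm)
  set W := (PySem.List.sorted I (fun x => x.2) true).map (fun wc => wc.1) with hWdef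
  have hWnodup : W.Nodup := by
    have hperm : W.Perm (I.map Prod.fst) :=
      (PySem.List.sorted_perm I (fun x => x.2) true).map _
    exact hperm.nodup_iff.mpr (items_fst_nodup seqs.flatten)
  -- B's side: the countdown assignment is enumerate over W
  have hB : (fitAltAssign buckets N (PySem.Dict.empty, 1)).1.items =
      (PySem.List.enumerate W 1).map (fun p => (p.2, p.1)) := by
    rw [fitAltAssign_eq, ← hsort,
      assign_fold W PySem.Dict.empty 1 (fun w _ => PySem.Dict.contains_empty w) hWnodup]
    simp [PySem.Dict.empty]
  rw [hB]
  -- A's side: dict(zip(W, range(1, n+1))) is the same list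
  have hlen : (PySem.List.pyRange 1 ((W.length : Int) + 1) 1).length = W.length := by
    rw [PySem.List.length_pyRange_one]
    omega
  have hfst : (W.zip (PySem.List.pyRange 1 ((W.length : Int) + 1) 1)).map Prod.fst = W :=
    List.map_fst_zip (by rw [hlen])
  rw [PySem.Dict.ofList, PySem.Dict.update,
    PySem.Dict.items_foldl_insert_fresh _ Prod.fst Prod.snd PySem.Dict.empty
      (fun a _ => PySem.Dict.contains_empty a.1) (by rw [hfst]; exact hWnodup)]
  rw [show PySem.Dict.empty.items = ([] : List (String × Int)) from rfl, List.nil_append,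
    show ((W.length : Int) + 1) = 1 + (W.length : Int) from by omega,
    zip_pyRange_eq_enumerate W 1]
  simp
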